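-- pv_equiv track=rewrite | github.com/antontomusiak/TopCoder | srm724/gravity_puzzle_easy.py | solve
-- ===== SOURCE A (Python) =====
-- def solve(board):
-- 	counts = [0 for i in range(len(board[0]))]
-- 	for i in range(len(board)):
-- 		for j in range(len(board[i])):
-- 			if board[i][j] == '#': counts[j] += 1
--
-- 	res = [[] for i in range(len(board))]
-- 	for i in range(len(board)-1, -1, -1):
-- 		for j in range(len(board[i])):
-- 			if counts[j] > 0:
-- 				res[i].append('#')
-- 				counts[j] -= 1
-- 			else: res[i].append('.')
-- 		res[i] = "".join(res[i])
--
-- 	return res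
-- ===== SOURCE B (Python) =====
-- def solve(board):
--     w = len(board[0])
--     cnt = [sum(1 for r in board if j < len(r) and r[j] == '#') for j in range(w)]
--     out = []
--     for i, r in enumerate(board):
--         below = board[i + 1:]
--         out.append("".join(
--             '#' if cnt[j] > sum(1 for rr in below if j < len(rr)) else '.'
--             for j in range(len(r))))
--     return out
-- ===== Notes on version B (the rewrite author's own statement) =====
-- stated objective: alternative
-- what changed: A fills rows bottom-up while mutating per-column counters; B decides each cell independently by a closed form: cell (i,j) is '#' iff the column's total '#' count exceeds the number of column-j cells strictly below row i.
import Mathlib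
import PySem

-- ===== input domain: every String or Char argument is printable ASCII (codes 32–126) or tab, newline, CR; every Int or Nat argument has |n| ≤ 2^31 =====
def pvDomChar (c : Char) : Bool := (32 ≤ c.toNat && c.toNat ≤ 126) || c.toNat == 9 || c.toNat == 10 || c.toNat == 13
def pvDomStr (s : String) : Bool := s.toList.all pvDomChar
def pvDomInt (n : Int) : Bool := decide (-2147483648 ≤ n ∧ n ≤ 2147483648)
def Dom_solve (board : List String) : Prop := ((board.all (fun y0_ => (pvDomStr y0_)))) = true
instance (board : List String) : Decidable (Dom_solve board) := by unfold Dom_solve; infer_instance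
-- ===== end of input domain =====

-- B replaces A's bottom-up row fill with decrementing per-column counters by a per-cell
-- closed form (cell is '#' iff the column's total '#' count exceeds the number of cells
-- below it in that column); objective: alternative, not faster.

-- ===== PORT A =====
-- first loop of A: scan one row, bumping counts[j] for each '#' (j is the running column index)
def countRowA (cs : List Nat) (j : Nat) : List Char → List Nat
  | [] => cs
  | c :: rest => countRowA (if c = '#' then cs.set j (cs.getD j 0 + 1) else cs) (j + 1) rest

def countsA (cs : List Nat) : List (List Char) → List Nat
  | [] => cs
  | r :: rs => countsA (countRowA cs 0 r) rs

-- second loop of A, inner: build one row's chars, consuming counts where positive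
def fillRowA (cs : List Nat) (j : Nat) : List Char → List Nat × List Char
  | [] => (cs, [])
  | _ :: rest =>
    if cs.getD j 0 > 0 then
      let p := fillRowA (cs.set j (cs.getD j 0 - 1)) (j + 1) rest
      (p.1, '#' :: p.2)
    else
      let p := fillRowA cs (j + 1) rest
      (p.1, '.' :: p.2)

-- second loop of A, outer: i from len-1 downto 0, so the tail is processed first
def fillA (cs : List Nat) : List (List Char) → List Nat × List (List Char)
  | [] => (cs, [])
  | r :: rs =>
    let q := fillA cs rs
    let p := fillRowA q.1 0 r
    (p.1, p.2 :: q.2)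

def solve (board : List String) : List String :=
  let rows := board.map (fun s => s.toList)
  let counts := countsA (List.replicate (board.headD "").toList.length 0) rows
  ((fillA counts rows).2).map (fun r => String.ofList r)

-- ===== PORT B =====
-- cnt[j] = sum(1 for r in board if j < len(r) and r[j] == '#')
def colCountB (rows : List (List Char)) (j : Nat) : Nat :=
  rows.countP (fun r => decide (j < r.length) && decide (r.getD j ' ' = '#'))

-- sum(1 for rr in below if j < len(rr))
def belowB (rows : List (List Char)) (j : Nat) : Nat :=
  rows.countP (fun r => decide (j < r.length))

-- the enumerate loop of B: each row decided from cnt and its own tail (board[i+1:])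
def fillB (cnt : List Nat) : List (List Char) → List (List Char)
  | [] => []
  | r :: rs =>
    ((List.range r.length).map (fun j => if cnt.getD j 0 > belowB rs j then '#' else '.'))
      :: fillB cnt rs

def solve_alt (board : List String) : List String :=
  let rows := board.map (fun s => s.toList)
  let w := (rows.headD []).length
  let cnt := (List.range w).map (colCountB rows)
  (fillB cnt rows).map (fun r => String.ofList r)

-- ===== PRECONDITION & SPEC =====
-- Pre_ excludes exactly the inputs where A raises IndexError: the empty board
-- (board[0]) and boards with a row longer than the first row (counts[j] out of range).
def Pre_solve (board : List String) : Prop :=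
  board ≠ [] ∧ ∀ r ∈ board, r.toList.length ≤ (board.headD "").toList.length

instance (board : List String) : Decidable (Pre_solve board) := by
  unfold Pre_solve; infer_instance

def pvWitness_solve : List String := ["#..", ".#.", "##"]

def Spec_solve (board : List String) (out : List String) : Prop := out = solve_alt board
instance (board : List String) (out : List String) : Decidable (Spec_solve board out) := by
  unfold Spec_solve; infer_instance

-- ===== CLAIM (what is proved, stated in full; the proofs are below) =====
def Claim_equal_solve : Prop :=
  ∀ (board : List String), Dom_solve board → Pre_solve board → Spec_solve board (solve board)

-- ===== LEMMAS AND PROOFS =====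

theorem getD_set_ne (cs : List Nat) (i j : Nat) (h : i ≠ j) (v : Nat) :
    (cs.set i v).getD j 0 = cs.getD j 0 := by
  simp [List.getD_eq_getElem?_getD, List.getElem?_set_ne h]

theorem getD_set_self (cs : List Nat) (i : Nat) (h : i < cs.length) (v : Nat) :
    (cs.set i v).getD i 0 = v := by
  simp [List.getD_eq_getElem?_getD, h]

theorem fillRowA_cons (cs : List Nat) (j : Nat) (c : Char) (rest : List Char) :
    fillRowA cs j (c :: rest) =
      if cs.getD j 0 > 0 then
        ((fillRowA (cs.set j (cs.getD j 0 - 1)) (j + 1) rest).1,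
         '#' :: (fillRowA (cs.set j (cs.getD j 0 - 1)) (j + 1) rest).2)
      else ((fillRowA cs (j + 1) rest).1, '.' :: (fillRowA cs (j + 1) rest).2) := rfl

theorem fillA_cons (cs : List Nat) (r : List Char) (rs : List (List Char)) :
    fillA cs (r :: rs) =
      ((fillRowA (fillA cs rs).1 0 r).1,
       (fillRowA (fillA cs rs).1 0 r).2 :: (fillA cs rs).2) := rfl

theorem countRowA_length (r : List Char) (cs : List Nat) (j : Nat) :
    (countRowA cs j r).length = cs.length := by
  induction r generalizing cs j with
  | nil => rfl
  | cons c rest ih => rw [countRowA, ih]; split <;> simp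

theorem countRowA_getD_lt (r : List Char) (cs : List Nat) (j0 j : Nat) (h : j < j0) :
    (countRowA cs j0 r).getD j 0 = cs.getD j 0 := by
  induction r generalizing cs j0 with
  | nil => rfl
  | cons c rest ih =>
    rw [countRowA, ih _ _ (by omega)]
    split
    · exact getD_set_ne _ _ _ (by omega) _
    · rfl

theorem countRowA_getD (r : List Char) (cs : List Nat) (j0 k : Nat)
    (hr : j0 + r.length ≤ cs.length) :
    (countRowA cs j0 r).getD (j0 + k) 0 =
      cs.getD (j0 + k) 0 + (if k < r.length ∧ r.getD k ' ' = '#' then 1 else 0) := by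
  induction r generalizing cs j0 k with
  | nil => simp [countRowA]
  | cons c rest ih =>
    rw [countRowA]
    simp only [List.length_cons] at hr
    cases k with
    | zero =>
      simp only [Nat.add_zero]
      rw [countRowA_getD_lt _ _ _ _ (Nat.lt_succ_self j0)]
      by_cases hc : c = '#'
      · rw [if_pos hc, getD_set_self _ _ (by omega)]
        simp [hc]
      · rw [if_neg hc]
        simp [hc]
    | succ k =>
      have e : j0 + (k + 1) = (j0 + 1) + k := by omega
      rw [e]
      by_cases hc : c = '#'
      · rw [if_pos hc, ih _ _ _ (by rw [List.length_set]; omega),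
            getD_set_ne _ _ _ (by omega) _]
        simp
      · rw [if_neg hc, ih _ _ _ (by omega)]
        simp

theorem countsA_length (rows : List (List Char)) (cs : List Nat) :
    (countsA cs rows).length = cs.length := by
  induction rows generalizing cs with
  | nil => rfl
  | cons r rs ih => rw [countsA, ih, countRowA_length]

theorem colCountB_cons (r : List Char) (rs : List (List Char)) (j : Nat) :
    colCountB (r :: rs) j =
      colCountB rs j + (if j < r.length ∧ r.getD j ' ' = '#' then 1 else 0) := by
  by_cases h1 : j < r.length <;> by_cases h2 : r.getD j ' ' = '#' <;>
    simp [colCountB, List.countP_cons, h1]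

theorem countsA_getD (rows : List (List Char)) (cs : List Nat) (j : Nat)
    (h : ∀ r ∈ rows, r.length ≤ cs.length) :
    (countsA cs rows).getD j 0 = cs.getD j 0 + colCountB rows j := by
  induction rows generalizing cs with
  | nil => simp [countsA, colCountB]
  | cons r rs ih =>
    rw [countsA, ih _ (fun r' hr' => by rw [countRowA_length]; exact h r' (by simp [hr']))]
    have h0 := countRowA_getD r cs 0 j (by simpa using h r (by simp))
    simp only [Nat.zero_add] at h0
    rw [h0, colCountB_cons]
    omega

theorem fillRowA_getD (r : List Char) (cs : List Nat) (j0 j : Nat) :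
    (fillRowA cs j0 r).1.getD j 0 =
      cs.getD j 0 - (if j0 ≤ j ∧ j < j0 + r.length then 1 else 0) := by
  induction r generalizing cs j0 with
  | nil =>
    rw [fillRowA]
    simp only [List.length_nil, Nat.add_zero]
    rw [if_neg (by omega)]
    omega
  | cons c rest ih =>
    rw [fillRowA_cons]
    simp only [List.length_cons]
    by_cases hp : cs.getD j0 0 > 0
    · rw [if_pos hp]
      show (fillRowA (cs.set j0 (cs.getD j0 0 - 1)) (j0 + 1) rest).1.getD j 0 = _
      rw [ih]
      rcases Nat.lt_trichotomy j j0 with hj | hj | hj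
      · rw [getD_set_ne _ _ _ (by omega) _, if_neg (by omega), if_neg (by omega)]
      · subst hj
        by_cases hin : j < cs.length
        · rw [getD_set_self _ _ hin, if_neg (by omega), if_pos (by omega)]
          omega
        · exact absurd hp (by rw [List.getD_eq_default _ _ (by omega)]; omega)
      · rw [getD_set_ne _ _ _ (by omega) _]
        by_cases h1 : j < j0 + 1 + rest.length
        · rw [if_pos (by omega), if_pos (by omega)]
        · rw [if_neg (by omega), if_neg (by omega)]
    · rw [if_neg hp]
      show (fillRowA cs (j0 + 1) rest).1.getD j 0 = _
      rw [ih]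
      rcases Nat.lt_trichotomy j j0 with hj | hj | hj
      · rw [if_neg (by omega), if_neg (by omega)]
      · subst hj
        have h0 : cs.getD j 0 = 0 := by omega
        rw [h0, if_neg (by omega), Nat.zero_sub, Nat.zero_sub]
      · by_cases h1 : j < j0 + 1 + rest.length
        · rw [if_pos (by omega), if_pos (by omega)]
        · rw [if_neg (by omega), if_neg (by omega)]

theorem fillRowA_out (r : List Char) (cs : List Nat) (j0 : Nat) :
    (fillRowA cs j0 r).2 =
      (List.range r.length).map (fun k => if cs.getD (j0 + k) 0 > 0 then '#' else '.') := by
  induction r generalizing cs j0 with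
  | nil => simp [fillRowA]
  | cons c rest ih =>
    have hmap : ∀ cs' : List Nat, (∀ k, cs'.getD (j0 + 1 + k) 0 = cs.getD (j0 + 1 + k) 0) →
        (fillRowA cs' (j0 + 1) rest).2 =
          (List.range rest.length).map (fun k => if cs.getD (j0 + 1 + k) 0 > 0 then '#' else '.') := by
      intro cs' h
      rw [ih]
      exact List.map_congr_left (fun k _ => by rw [h k])
    have hrange : (List.range (c :: rest).length).map
          (fun k => if cs.getD (j0 + k) 0 > 0 then '#' else '.')
        = (if cs.getD j0 0 > 0 then '#' else '.') ::
            (List.range rest.length).map (fun k => if cs.getD (j0 + 1 + k) 0 > 0 then '#' else '.') := by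
      simp only [List.length_cons, List.range_succ_eq_map, List.map_cons, List.map_map,
        Nat.add_zero]
      congr 1
      apply List.map_congr_left
      intro k _
      simp only [Function.comp_apply]
      have e : j0 + (k + 1) = j0 + 1 + k := by omega
      rw [e]
    rw [fillRowA_cons, hrange]
    by_cases hp : cs.getD j0 0 > 0
    · rw [if_pos hp, if_pos hp]
      exact congrArg (List.cons '#') (hmap _ (fun k => getD_set_ne _ _ _ (by omega) _))
    · rw [if_neg hp, if_neg hp]
      exact congrArg (List.cons '.') (hmap _ (fun _ => rfl))

theorem belowB_cons (r : List Char) (rs : List (List Char)) (j : Nat) :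
    belowB (r :: rs) j = belowB rs j + (if j < r.length then 1 else 0) := by
  by_cases h : j < r.length <;> simp [belowB, h]

theorem fillA_spec (rows : List (List Char)) (cs : List Nat)
    (h : ∀ r ∈ rows, r.length ≤ cs.length) :
    (∀ j, (fillA cs rows).1.getD j 0 = cs.getD j 0 - belowB rows j) ∧
      (fillA cs rows).2 = fillB cs rows := by
  induction rows generalizing cs with
  | nil => simp [fillA, fillB, belowB]
  | cons r rs ih =>
    obtain ⟨ihc, iho⟩ := ih cs (fun r' hr' => h r' (by simp [hr']))
    rw [fillA_cons]
    constructor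
    · intro j
      rw [fillRowA_getD, ihc j, belowB_cons,
          show (if 0 ≤ j ∧ j < 0 + r.length then 1 else 0) = (if j < r.length then 1 else 0)
            from by by_cases h' : j < r.length <;> simp [h']]
      omega
    · have hout : (fillRowA (fillA cs rs).1 0 r).2
          = (List.range r.length).map (fun j => if cs.getD j 0 > belowB rs j then '#' else '.') := by
        rw [fillRowA_out]
        apply List.map_congr_left
        intro k _
        rw [Nat.zero_add, ihc k]
        by_cases hgt : cs.getD k 0 > belowB rs k
        · rw [if_pos (by omega), if_pos hgt]
        · rw [if_neg (by omega), if_neg hgt]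
      rw [fillB]
      exact congrArg₂ List.cons hout iho

theorem fillB_congr (rows : List (List Char)) (c1 c2 : List Nat)
    (h : ∀ j, c1.getD j 0 = c2.getD j 0) : fillB c1 rows = fillB c2 rows := by
  induction rows with
  | nil => rfl
  | cons r rs ih =>
    rw [fillB, fillB, ih]
    congr 1
    apply List.map_congr_left
    intro j _
    rw [h j]

theorem solve_eq_alt (board : List String) (hpre : Pre_solve board) :
    solve board = solve_alt board := by
  obtain ⟨hne, hlen⟩ := hpre
  obtain ⟨b0, bs, rfl⟩ : ∃ b0 bs, board = b0 :: bs := by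
    cases board with
    | nil => exact absurd rfl hne
    | cons b0 bs => exact ⟨b0, bs, rfl⟩
  simp only [solve, solve_alt, List.headD, List.map_cons]
  set rows : List (List Char) := b0.toList :: bs.map (fun s => s.toList) with hrows
  set w : Nat := b0.toList.length with hw
  have hrlen : ∀ r ∈ rows, r.length ≤ w := by
    intro r hr
    rw [hrows] at hr
    rcases List.mem_cons.mp hr with h | h
    · rw [h]
    · obtain ⟨s, hs, rfl⟩ := List.mem_map.mp h
      simpa [hw] using hlen s (by simp [hs])
  have hcslen : (countsA (List.replicate w 0) rows).length = w := by
    rw [countsA_length, List.length_replicate]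
  have hgetD : ∀ j, (countsA (List.replicate w 0) rows).getD j 0 =
      ((List.range w).map (colCountB rows)).getD j 0 := by
    intro j
    by_cases hj : j < w
    · rw [countsA_getD rows _ j (by simpa using hrlen)]
      rw [List.getD_eq_getElem _ _ (by simpa using hj)]
      simp [hj]
    · rw [List.getD_eq_default _ _ (by rw [hcslen]; omega),
          List.getD_eq_default _ _ (by simp; omega)]
  have hfill := fillA_spec rows (countsA (List.replicate w 0) rows)
    (fun r hr => by rw [hcslen]; exact hrlen r hr)
  rw [hfill.2, fillB_congr rows _ _ hgetD]

-- ===== VERDICT (by name: the statement is the Claim_ definition above) =====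
theorem solve_spec : Claim_equal_solve := by
  intro board _ hpre
  unfold Spec_solve
  exact solve_eq_alt board hpre
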